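-- pv_equiv track=rewrite | github.com/jolly-hare/Advent-of-Code | 2022/03/03.py | part2
-- ===== SOURCE A (Python) =====
-- def part2(data):
--     n = 3
--     data2 = [''.join(i) for i in data]
--     groups = [data2[i:i + n] for i in range(0, len(data2), n)]
--     total = 0
--     for i in groups:
--         letter = ''.join(set(i[0]).intersection(set(i[1]), set(i[2])))
--         priority = ord(letter) - 96
--         if priority < 0:
--             priority += 58
--         total += priority
--     return total
-- ===== SOURCE B (Python) =====
-- def part2(data):
--     lines = [''.join(g) for g in data]
--     total = 0
--     while lines:
--         a, b, c = lines[0], lines[1], lines[2]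
--         lines = lines[3:]
--         ch = next(x for x in a if x in b and x in c)
--         o = ord(ch)
--         total += o - 96 if o >= 96 else o - 38
--     return total
-- ===== Notes on version B (the rewrite author's own statement) =====
-- stated objective: alternative
-- what changed: B drops A's set-building, set.intersection and join entirely: it consumes the joined lines three at a time with a while loop, finds the first character of the first line that occurs in the other two by direct membership scan, and computes the priority with a single branch on the character code (o-96 if o>=96 else o-38) instead of A's subtract-then-conditionally-add-58.
import Mathlib
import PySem

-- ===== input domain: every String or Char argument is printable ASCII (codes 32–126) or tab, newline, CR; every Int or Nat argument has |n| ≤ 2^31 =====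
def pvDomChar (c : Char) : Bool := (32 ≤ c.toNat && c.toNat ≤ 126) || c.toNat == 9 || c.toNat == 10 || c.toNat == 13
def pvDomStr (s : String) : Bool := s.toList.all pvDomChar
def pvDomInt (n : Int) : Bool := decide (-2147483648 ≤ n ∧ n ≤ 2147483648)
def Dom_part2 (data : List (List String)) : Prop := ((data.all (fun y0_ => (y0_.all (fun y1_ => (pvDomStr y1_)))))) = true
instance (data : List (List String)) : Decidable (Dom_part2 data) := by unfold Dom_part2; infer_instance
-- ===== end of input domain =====

-- B replaces A's set-intersection + join + conditional "+58" priority fix with a direct scan for the first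
-- character common to the three lines of a group and a single branch on its code point (objective: alternative).

-- ===== PORT A =====
-- body of A's 'for i in groups' loop
def part2Body (total : Int) (i : List String) : Int :=
  -- set(i[0]).intersection(set(i[1]), set(i[2])); i[0]/i[1]/i[2] raise IndexError on a short group (outside Pre_)
  let s0 : PySem.Set Char := PySem.Set.ofList (PySem.List.pyGetD i 0 "").toList
  let s1 : PySem.Set Char := PySem.Set.ofList (PySem.List.pyGetD i 1 "").toList
  let s2 : PySem.Set Char := PySem.Set.ofList (PySem.List.pyGetD i 2 "").toList
  let inter : PySem.Set Char := PySem.Set.inter (PySem.Set.inter s0 s1) s2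
  -- ord(''.join(inter)): Python returns only when the intersection is a singleton (TypeError otherwise, outside Pre_)
  let o : Int := match inter with
    | [ch] => (ch.toNat : Int)
    | _ => 0
  let priority := o - 96
  let priority := if priority < 0 then priority + 58 else priority
  total + priority

def part2 (data : List (List String)) : Int :=
  let data2 := data.map (fun i => PySem.Str.join "" i)
  let groups := (PySem.List.pyRange 0 (PySem.List.len data2) 3).map
    (fun i => PySem.List.slice data2 (some i) (some (i + 3)))
  groups.foldl part2Body 0

-- ===== PORT B =====
-- B's while loop, consuming three joined lines at a time
def part2AltGo (lines : List String) (total : Int) : Int :=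
  match lines with
  | a :: b :: c :: rest =>
    -- next(x for x in a if x in b and x in c); 'x in s' on a single character is membership
    let o : Int := match a.toList.find? (fun x => b.toList.contains x && c.toList.contains x) with
      | some ch => (ch.toNat : Int)
      | none => 0  -- Python raises StopIteration here (outside Pre_)
    part2AltGo rest (total + (if 96 ≤ o then o - 96 else o - 38))
  | _ => total  -- [] ends the loop; 1 or 2 leftover lines raise IndexError in Python (outside Pre_)

def part2_alt (data : List (List String)) : Int :=
  part2AltGo (data.map (fun g => PySem.Str.join "" g)) 0

-- ===== PRECONDITION & SPEC =====
-- the distinct characters common to the three lines of one group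
def pvCommons (a b c : String) : List Char :=
  (PySem.Set.ofList a.toList).filter (fun x => b.toList.contains x && c.toList.contains x)

def pvPreGroups : List String → Bool
  | [] => true
  | a :: b :: c :: rest => (pvCommons a b c).length == 1 && pvPreGroups rest
  | _ => false

-- Pre_ excludes exactly the inputs on which A raises: a trailing group of fewer than three lines
-- (IndexError on i[1]/i[2]) and any group of three whose lines do not have exactly one common
-- character (ord('') or ord of a multi-character string: TypeError). A returns on every other input.
def Pre_part2 (data : List (List String)) : Prop :=
  pvPreGroups (data.map (fun g => PySem.Str.join "" g)) = true

instance (data : List (List String)) : Decidable (Pre_part2 data) := by unfold Pre_part2; infer_instance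

def pvWitness_part2 : List (List String) := [["a"], ["ab"], ["ca"]]

def Spec_part2 (data : List (List String)) (out : Int) : Prop := out = part2_alt data
instance (data : List (List String)) (out : Int) : Decidable (Spec_part2 data out) := by unfold Spec_part2; infer_instance

-- ===== CLAIM (what is proved, stated in full; the proofs are below) =====
def Claim_equal_part2 : Prop := ∀ (data : List (List String)), Dom_part2 data → Pre_part2 data → Spec_part2 data (part2 data)

-- ===== LEMMAS AND PROOFS =====

theorem head?_filter_ofList {α : Type} [BEq α] [LawfulBEq α] (p : α → Bool) (l : List α) :
    ((PySem.Set.ofList l).filter p).head? = (l.filter p).head? := by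
  induction l with
  | nil => rfl
  | cons x xs ih =>
    rw [PySem.Set.ofList_cons]
    by_cases hp : p x
    · simp [hp]
    · simp only [List.filter_cons, hp, Bool.false_eq_true, ite_false]
      rw [← ih]
      unfold PySem.Set.discard
      rw [List.filter_filter]
      congr 1
      apply List.filter_congr
      intro y _
      by_cases hyx : y = x
      · subst hyx
        have hpx : p y = false := by simpa using hp
        simp [hpx]
      · simp [hyx]

-- A's intersection on a group [a, b, c] is pvCommons a b c
theorem inter_eq_commons (a b c : String) :
    PySem.Set.inter (PySem.Set.inter (PySem.Set.ofList a.toList) (PySem.Set.ofList b.toList))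
      (PySem.Set.ofList c.toList) = pvCommons a b c := by
  unfold PySem.Set.inter pvCommons
  rw [List.filter_filter]
  apply List.filter_congr
  intro y _
  simp [PySem.Set.contains_eq_listContains, PySem.Set.mem_ofList]
  rw [Bool.and_comm]

-- one group's contribution: A's body equals B's step value when the group has one common character
theorem body_eq (a b c : String) (total : Int) (h : (pvCommons a b c).length = 1) :
    part2Body total [a, b, c] =
      total + (let o : Int := match a.toList.find? (fun x => b.toList.contains x && c.toList.contains x) with
        | some ch => (ch.toNat : Int)
        | none => 0
        if 96 ≤ o then o - 96 else o - 38) := by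
  obtain ⟨ch, hch⟩ := List.length_eq_one_iff.mp h
  have hfind : a.toList.find? (fun x => b.toList.contains x && c.toList.contains x) = some ch := by
    rw [← List.head?_filter]
    have := head?_filter_ofList (fun x => b.toList.contains x && c.toList.contains x) a.toList
    rw [← this]
    have : (PySem.Set.ofList a.toList).filter (fun x => b.toList.contains x && c.toList.contains x)
        = pvCommons a b c := rfl
    rw [this, hch]
    rfl
  unfold part2Body
  simp only [PySem.List.pyGetD_ofNat', List.getD, List.getElem?_cons_zero,
    List.getElem?_cons_succ, Option.getD_some]
  rw [inter_eq_commons a b c, hch, hfind]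
  show (total + if (ch.toNat : Int) - 96 < 0 then (ch.toNat : Int) - 96 + 58 else (ch.toNat : Int) - 96)
      = total + (if (96 : Int) ≤ (ch.toNat : Int) then (ch.toNat : Int) - 96 else (ch.toNat : Int) - 38)
  split_ifs <;> omega

-- A's slice-comprehension grouping peels off one triple at a time
theorem groups_cons (a b c : String) (rest : List String) :
    (PySem.List.pyRange 0 (PySem.List.len (a :: b :: c :: rest)) 3).map
      (fun i => PySem.List.slice (a :: b :: c :: rest) (some i) (some (i + 3)))
    = [a, b, c] ::
      (PySem.List.pyRange 0 (PySem.List.len rest) 3).map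
        (fun i => PySem.List.slice rest (some i) (some (i + 3))) := by
  rw [PySem.List.pyRange_of_pos 0 _ (by norm_num), PySem.List.pyRange_of_pos 0 _ (by norm_num)]
  simp only [PySem.List.len_eq, List.length_cons]
  have hn : (0:Int) ≤ (rest.length : Int) := by positivity
  have hcount : (if (0:Int) < ((rest.length + 1 + 1 + 1 : Nat) : Int) then
        ((((rest.length + 1 + 1 + 1 : Nat) : Int) - 0 + 3 - 1) / 3).toNat else 0)
      = ((if (0:Int) < (rest.length : Int) then (((rest.length : Int) - 0 + 3 - 1) / 3).toNat else 0)) + 1 := by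
    push_cast
    split_ifs with h1 h2 <;> omega
  rw [hcount, List.range_succ_eq_map]
  simp only [List.map_cons, List.map_map]
  refine List.cons_eq_cons.mpr ⟨?_, ?_⟩
  case _ =>
    -- head: slice l 0 3 = [a, b, c]
    show PySem.List.slice (a :: b :: c :: rest) (some (0 + 3 * ((0:Nat) : Int)))
        (some (0 + 3 * ((0:Nat) : Int) + 3)) = [a, b, c]
    have h1 : (0 + 3 * ((0:Nat) : Int)) = ((0:Nat) : Int) := by omega
    rw [h1]
    have h2 : (((0:Nat) : Int) + 3) = (((0:Nat) : Int) + ((3:Nat) : Int)) := by omega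
    rw [h2, PySem.List.slice_natCast_add]
    rfl
  case _ =>
    -- tail: shift by one triple
    apply List.map_congr_left
    intro k _
    simp only [Function.comp_apply, Nat.succ_eq_add_one]
    show PySem.List.slice (a :: b :: c :: rest) (some (0 + 3 * ((k + 1 : Nat) : Int)))
        (some (0 + 3 * ((k + 1 : Nat) : Int) + 3))
      = PySem.List.slice rest (some (0 + 3 * (k : Int))) (some (0 + 3 * (k : Int) + 3))
    have h1 : (0 + 3 * ((k + 1 : Nat) : Int)) = (((3 * k + 3 : Nat)) : Int) := by omega
    have h3 : (0 + 3 * ((k : Nat) : Int)) = (((3 * k : Nat)) : Int) := by omega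
    rw [h1, h3]
    have h2 : ((((3 * k + 3 : Nat)) : Int) + 3) = (((3 * k + 3 : Nat) : Int) + ((3 : Nat) : Int)) := by omega
    have h4 : ((((3 * k : Nat)) : Int) + 3) = (((3 * k : Nat) : Int) + ((3 : Nat) : Int)) := by omega
    rw [h2, h4, PySem.List.slice_natCast_add, PySem.List.slice_natCast_add]
    have : (a :: b :: c :: rest).drop (3 * k + 3) = rest.drop (3 * k) := by
      rw [show 3 * k + 3 = (3 * k) + 3 by ring]
      rfl
    rw [this]

-- main loop equivalence
theorem fold_eq_go : ∀ (lines : List String) (total : Int), pvPreGroups lines = true →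
    ((PySem.List.pyRange 0 (PySem.List.len lines) 3).map
      (fun i => PySem.List.slice lines (some i) (some (i + 3)))).foldl part2Body total
    = part2AltGo lines total
  | [], total, _ => by
    simp [PySem.List.pyRange_of_pos 0 0 (show (0:Int) < 3 by norm_num), part2AltGo]
  | [a], _, h => by simp [pvPreGroups] at h
  | [a, b], _, h => by simp [pvPreGroups] at h
  | a :: b :: c :: rest, total, h => by
    have hpre : (pvCommons a b c).length = 1 ∧ pvPreGroups rest = true := by
      simpa [pvPreGroups, Bool.and_eq_true, beq_iff_eq] using h
    rw [groups_cons, List.foldl_cons, body_eq a b c total hpre.1]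
    rw [fold_eq_go rest _ hpre.2]
    rfl

-- ===== VERDICT (by name: the statement is the Claim_ definition above) =====
theorem part2_spec : Claim_equal_part2 := by
  intro data _dom hpre
  unfold Spec_part2 part2 part2_alt
  exact fold_eq_go (data.map (fun i => PySem.Str.join "" i)) 0 hpre
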